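-- pv_equiv track=rewrite | github.com/rpural/DailyCodingProblem | Daily Coding Problem/qux.py | qux
-- ===== SOURCE A (Python) =====
-- def qux(quxlist):
--     quxl = list(quxlist)
--     conversions = {"RG": "B", "RB": "G", "BG": "R",
--                    "GR": "B", "BR": "G", "GB": "R"}
--
--     p = 0
--     while True:
--         if p < len(quxl) - 1:
--             comb = quxl[p] + quxl[p+1]
--             if comb in conversions:
--                 quxl[p] = conversions[comb]
--                 del quxl[p+1]
--                 p = -1
--         else:
--             break
--         p += 1
--         if p == len(quxl):
--             break
--
--     return quxl
-- ===== SOURCE B (Python) =====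
-- def qux(quxlist):
--     conversions = {"RG": "B", "RB": "G", "BG": "R",
--                    "GR": "B", "BR": "G", "GB": "R"}
--     stack = []
--     for ch in quxlist:
--         cur = ch
--         while stack and stack[-1] + cur in conversions:
--             cur = conversions[stack.pop() + cur]
--         stack.append(cur)
--     return stack
-- ===== Notes on version B (the rewrite author's own statement) =====
-- stated objective: alternative
-- what changed: A rescans the list from index 0 after every merge (delete + restart); B does one left-to-right pass keeping a stack of the irreducible prefix and merges the stack top with the incoming element while combinable.
import Mathlib
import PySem

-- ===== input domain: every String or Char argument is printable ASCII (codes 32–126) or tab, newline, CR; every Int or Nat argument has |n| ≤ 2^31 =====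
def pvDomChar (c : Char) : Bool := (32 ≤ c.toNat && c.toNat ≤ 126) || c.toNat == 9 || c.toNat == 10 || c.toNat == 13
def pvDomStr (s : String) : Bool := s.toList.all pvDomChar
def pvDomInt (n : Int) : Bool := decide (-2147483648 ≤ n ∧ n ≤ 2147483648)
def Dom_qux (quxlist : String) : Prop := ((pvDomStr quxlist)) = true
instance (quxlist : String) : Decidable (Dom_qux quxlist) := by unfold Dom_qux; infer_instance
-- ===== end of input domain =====

-- B replaces A's restart-from-zero rescans after each merge with a single left-to-right
-- pass keeping a stack of the already-irreducible prefix (objective: alternative).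

-- ===== PORT A =====
-- the conversions dict of both Pythons
def quxConversions : PySem.Dict String String :=
  PySem.Dict.ofList [("RG", "B"), ("RB", "G"), ("BG", "R"),
                     ("GR", "B"), ("BR", "G"), ("GB", "R")]

-- A's while-loop.  Python's p is set to -1 only immediately before 'p += 1', so at every
-- loop test it is a nonnegative int — represented as Nat; Python's int test
-- 'p < len(quxl) - 1' is written as 'p + 1 < len'.  Both 'break' checks are kept.
def quxLoop (quxl : List String) (p : Nat) : List String :=
  if h : p + 1 < quxl.length then
    let comb := quxl[p] ++ quxl[p + 1]
    match quxConversions.get? comb with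
    | some c =>
      let quxl' := (quxl.set p c).eraseIdx (p + 1)
      -- p = -1; p += 1; if p == len(quxl): break
      if 0 = quxl'.length then quxl' else quxLoop quxl' 0
    | none =>
      -- p += 1; if p == len(quxl): break
      if p + 1 = quxl.length then quxl else quxLoop quxl (p + 1)
  else quxl
termination_by (quxl.length, quxl.length - p)
decreasing_by
  · left
    simp only [List.length_eraseIdx, List.length_set, if_pos h]
    omega
  · right
    omega

def qux (quxlist : String) : List String :=
  quxLoop (quxlist.toList.map (fun c => String.mk [c])) 0

-- ===== PORT B =====
-- B's inner while-loop: cur absorbs combinable stack tops.  The stack is kept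
-- top-at-head (Python appends/pops at the end), so qux_alt reverses it at the end.
def quxPush (stack : List String) (cur : String) : List String :=
  match stack with
  | [] => [cur]
  | t :: rest =>
    match quxConversions.get? (t ++ cur) with
    | some c => quxPush rest c
    | none => cur :: t :: rest

def qux_alt (quxlist : String) : List String :=
  (((quxlist.toList.map (fun c => String.mk [c])).foldl quxPush [])).reverse

-- ===== PRECONDITION & SPEC =====
def Spec_qux (quxlist : String) (out : List String) : Prop := out = qux_alt quxlist
instance (quxlist : String) (out : List String) : Decidable (Spec_qux quxlist out) := by unfold Spec_qux; infer_instance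

-- ===== CLAIM (what is proved, stated in full; the proofs are below) =====
def Claim_equal_qux : Prop := ∀ (quxlist : String), Dom_qux quxlist → Spec_qux quxlist (qux quxlist)

-- ===== LEMMAS AND PROOFS =====

-- adjacent pair not combinable
def Uncomb (a b : String) : Prop := quxConversions.get? (a ++ b) = none

-- scanning over an uncombinable stretch just advances p
lemma quxLoop_scan (quxl : List String) (p q : Nat) (hpq : p ≤ q) (hq : q + 1 ≤ quxl.length)
    (h : ∀ i, p ≤ i → i < q → (hi : i + 1 < quxl.length) → Uncomb quxl[i] quxl[i + 1]) :
    quxLoop quxl p = quxLoop quxl q := by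
  rcases Nat.eq_or_lt_of_le hpq with heq | hlt
  · rw [heq]
  · have hp1 : p + 1 < quxl.length := by omega
    have hu := h p le_rfl hlt hp1
    unfold Uncomb at hu
    have step : quxLoop quxl p = quxLoop quxl (p + 1) := by
      rw [quxLoop, dif_pos hp1]
      simp only [hu]
      rw [if_neg (by omega)]
    rw [step]
    exact quxLoop_scan quxl (p + 1) q hlt hq (fun i h1 h2 hi => h i (by omega) h2 hi)
termination_by q - p

lemma get_mid₀ {α : Type} (l r : List α) (a : α) (h : l.length < (l ++ a :: r).length) :
    (l ++ a :: r)[l.length] = a := by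
  rw [List.getElem_append_right le_rfl]
  simp

lemma get_mid₁ {α : Type} (l r : List α) (a b : α) (h : l.length + 1 < (l ++ a :: b :: r).length) :
    (l ++ a :: b :: r)[l.length + 1] = b := by
  rw [List.getElem_append_right (by omega)]
  simp

lemma quxSetMid {α : Type} (l r : List α) (a c : α) (i : Nat) (hi : i = l.length) :
    (l ++ a :: r).set i c = l ++ c :: r := by
  subst hi
  induction l with
  | nil => simp
  | cons y ys ih => simp [ih]

lemma quxEraseMid {α : Type} (l r : List α) (a c : α) (i : Nat) (hi : i = l.length + 1) :
    (l ++ c :: a :: r).eraseIdx i = l ++ c :: r := by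
  subst hi
  induction l with
  | nil => simp [List.eraseIdx]
  | cons y ys ih => simpa [List.eraseIdx] using ih

-- main invariant: A, scanning at the right edge of the irreducible reversed-stack
-- prefix, computes what B's fold computes
theorem quxLoop_push : ∀ (rest s : List String), s ≠ [] → List.IsChain Uncomb s.reverse →
    quxLoop (s.reverse ++ rest) (s.length - 1) = (List.foldl quxPush s rest).reverse
  | [], s, hs, hirr => by
    rw [quxLoop, dif_neg (by simp; omega)]
    simp
  | x :: rest', h :: t, hs, hirr => by
    have hshape : (h :: t).reverse ++ x :: rest' = t.reverse ++ h :: x :: rest' := by simp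
    have hlen : (h :: t).length - 1 = t.length := by simp
    rw [hshape, hlen]
    have hp : t.length + 1 < (t.reverse ++ h :: x :: rest').length := by
      simp only [List.length_append, List.length_reverse, List.length_cons]; omega
    rw [quxLoop, dif_pos hp]
    have e0 : (t.reverse ++ h :: x :: rest')[t.length]'(by omega) = h := by
      have := get_mid₀ t.reverse (x :: rest') h (by simpa using (by omega : t.length < t.length + (2 + rest'.length)))
      simpa using this
    have e1 : (t.reverse ++ h :: x :: rest')[t.length + 1]'hp = x := by
      have := get_mid₁ t.reverse rest' h x (by simpa using (by omega : t.length + 1 < t.length + (2 + rest'.length)))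
      simpa using this
    rw [List.foldl_cons]
    cases hget : quxConversions.get? (h ++ x) with
    | none =>
      simp only [e0, e1, hget]
      rw [if_neg (by simp only [List.length_append, List.length_reverse, List.length_cons]; omega)]
      have hpush : quxPush (h :: t) x = x :: h :: t := by
        rw [quxPush, hget]
      rw [hpush]
      have := quxLoop_push rest' (x :: h :: t) (by simp) (by
        rw [show (x :: h :: t).reverse = (h :: t).reverse ++ [x] by simp]
        refine hirr.append (List.isChain_singleton x) ?_
        intro a ha y hy
        simp only [List.head?_cons, Option.mem_def, Option.some.injEq] at hy
        rw [show (h :: t).reverse = t.reverse ++ [h] by simp, List.getLast?_concat] at ha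
        simp only [Option.mem_def, Option.some.injEq] at ha
        subst ha; subst hy
        exact hget)
      rw [show (x :: h :: t).reverse ++ rest' = t.reverse ++ h :: x :: rest' by simp] at this
      rw [show (x :: h :: t).length - 1 = t.length + 1 by simp] at this
      exact this
    | some c =>
      simp only [e0, e1, hget]
      -- set then delete: the merge replaces h and x by c
      have hset : (t.reverse ++ h :: x :: rest').set t.length c = t.reverse ++ c :: x :: rest' :=
        quxSetMid t.reverse _ h c t.length (by simp)
      have herase : (t.reverse ++ c :: x :: rest').eraseIdx (t.length + 1) =
          t.reverse ++ c :: rest' :=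
        quxEraseMid t.reverse _ x c (t.length + 1) (by simp)
      rw [hset, herase]
      rw [if_neg (by simp)]
      have hpush : quxPush (h :: t) x = quxPush t c := by
        rw [quxPush, hget]
      rw [hpush]
      cases t with
      | nil =>
        simp only [List.reverse_nil, List.nil_append]
        have := quxLoop_push rest' [c] (by simp) (by simp)
        simpa [quxPush] using this
      | cons t0 t1 =>
        have hchain : List.IsChain Uncomb (t0 :: t1).reverse := by
          have : List.IsChain Uncomb ((t0 :: t1).reverse ++ [h]) := by
            simpa using hirr
          exact this.left_of_append
        have hscan : quxLoop ((t0 :: t1).reverse ++ c :: rest') 0 =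
            quxLoop ((t0 :: t1).reverse ++ c :: rest') ((t0 :: t1).length - 1) := by
          apply quxLoop_scan
          · omega
          · simp only [List.length_append, List.length_reverse, List.length_cons]; omega
          · intro i hi0 hi hi1
            have hlt : i + 1 < (t0 :: t1).reverse.length := by
              simp only [List.length_reverse, List.length_cons]
              simp only [List.length_cons] at hi
              omega
            have gi : ((t0 :: t1).reverse ++ c :: rest')[i]'(by omega) = (t0 :: t1).reverse[i]'(by omega) :=
              List.getElem_append_left (by omega)
            have gi1 : ((t0 :: t1).reverse ++ c :: rest')[i + 1]'hi1 = (t0 :: t1).reverse[i + 1]'hlt :=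
              List.getElem_append_left hlt
            rw [gi, gi1]
            exact List.isChain_iff_getElem.mp hchain i hlt
        rw [hscan, quxLoop_push (c :: rest') (t0 :: t1) (by simp) hchain,
          List.foldl_cons]
termination_by rest s => (rest.length, s.length)
decreasing_by all_goals first
  | (apply Prod.Lex.right; subst_vars; simp)
  | (apply Prod.Lex.left; subst_vars; simp)

-- ===== VERDICT (by name: the statement is the Claim_ definition above) =====
theorem qux_spec : Claim_equal_qux := by
  intro quxlist _
  unfold Spec_qux qux qux_alt
  cases hl : quxlist.toList.map (fun c => String.mk [c]) with
  | nil => simp [quxLoop]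
  | cons x rest =>
    have := quxLoop_push rest [x] (by simp) (by simp)
    simpa [quxPush] using this
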